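-- pv_equiv track=rewrite | github.com/NathanVaughn/vscode-task-runner | vscode_task_runner/vscode/terminal_task_system.py | _add_all_argument
-- ===== SOURCE A (Python) =====
-- import copy
-- from typing import List, Optional, Tuple
--
-- def _add_all_argument(
--     shell_command_args: List[str], configured_shell_args: List[str]
-- ) -> List[str]:
--     # https://github.com/microsoft/vscode/blob/5944e7c37c6abb80f1cc822a8c5b593ef028ff26/src/vs/workbench/contrib/tasks/browser/terminalTaskSystem.ts#L1306-L1321
--
--     # converted with ChatGPT
--     combined_shell_args = copy.deepcopy(configured_shell_args)
--     for element in shell_command_args: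
--         should_add_shell_command_arg = all(
--             (arg.lower() != element)
--             # We can still add the argument, but only if not all of the following arguments begin with "-".
--             or (
--                 (len(configured_shell_args) > index + 1)
--                 and (
--                     not all(
--                         test_arg.startswith("-")
--                         for test_arg in configured_shell_args[index + 1 :]
--                     )
--                 )
--             )
--             for index, arg in enumerate(configured_shell_args)
--         )
--         if should_add_shell_command_arg:
--             combined_shell_args.append(element)
--
--     return combined_shell_args
-- ===== SOURCE B (Python) =====
-- import copy
-- from typing import List
--
--
-- def _add_all_argument(
--     shell_command_args: List[str], configured_shell_args: List[str]
-- ) -> List[str]: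
--     # One backward pass builds the set of configured args (lowercased) that block
--     # a command arg: arg at index i blocks iff every configured arg after i starts with "-".
--     blocking = set()
--     tail_all_dash = True  # whether all elements after the current index start with "-"
--     for i in range(len(configured_shell_args) - 1, -1, -1):
--         if tail_all_dash:
--             blocking.add(configured_shell_args[i].lower())
--         tail_all_dash = tail_all_dash and configured_shell_args[i].startswith("-")
--     combined_shell_args = copy.deepcopy(configured_shell_args)
--     for element in shell_command_args:
--         if element not in blocking:
--             combined_shell_args.append(element)
--     return combined_shell_args
-- ===== Notes on version B (the rewrite author's own statement) =====
-- stated objective: faster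
-- what changed: Replaces A's per-element nested scan (for each command arg, re-enumerate all configured args and re-scan each suffix for dashes) with a single backward pass over configured_shell_args that precomputes the set of blocking lowercased args, then one flat pass over shell_command_args.
import Mathlib
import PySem

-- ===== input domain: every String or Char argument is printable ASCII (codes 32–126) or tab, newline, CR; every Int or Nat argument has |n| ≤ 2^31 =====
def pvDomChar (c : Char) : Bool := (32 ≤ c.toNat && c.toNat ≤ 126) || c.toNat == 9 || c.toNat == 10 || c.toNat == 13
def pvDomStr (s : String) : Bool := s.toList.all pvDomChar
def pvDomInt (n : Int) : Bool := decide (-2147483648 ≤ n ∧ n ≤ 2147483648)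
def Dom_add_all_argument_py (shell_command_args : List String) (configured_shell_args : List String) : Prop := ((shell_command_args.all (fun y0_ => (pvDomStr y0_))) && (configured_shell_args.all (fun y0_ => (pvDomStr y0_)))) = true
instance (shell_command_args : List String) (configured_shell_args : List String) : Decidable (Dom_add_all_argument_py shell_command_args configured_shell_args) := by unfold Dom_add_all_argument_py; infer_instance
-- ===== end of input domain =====

-- B precomputes the set of blocking configured args in one backward pass, then filters in one flat pass;
-- A rescans every configured suffix for every command arg. Same return value, proved below.

-- ===== PORT A =====
def add_all_argument_py (shell_command_args : List String) (configured_shell_args : List String) : List String :=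
  shell_command_args.foldl (fun combined_shell_args element =>
    let should_add_shell_command_arg :=
      (PySem.List.enumerate configured_shell_args).all (fun p =>
        (!(PySem.Str.lower p.2 == element)) ||
        (decide ((configured_shell_args.length : Int) > p.1 + 1) &&
          !((PySem.List.slice configured_shell_args (some (p.1 + 1)) none).all
              (fun test_arg => PySem.Str.startswith test_arg "-"))))
    if should_add_shell_command_arg then combined_shell_args ++ [element] else combined_shell_args)
    configured_shell_args

-- ===== PORT B =====
-- backward pass of Source B as structural recursion: returns (blocking set, "all elements start with '-'")
def pvCollectBlocking : List String → PySem.Set String × Bool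
  | [] => (PySem.Set.empty, true)
  | a :: rest =>
    let st := pvCollectBlocking rest
    (if st.2 then PySem.Set.add st.1 (PySem.Str.lower a) else st.1,
     st.2 && PySem.Str.startswith a "-")

def add_all_argument_py_alt (shell_command_args : List String) (configured_shell_args : List String) : List String :=
  let blocking := (pvCollectBlocking configured_shell_args).1
  shell_command_args.foldl (fun combined_shell_args element =>
    if !(PySem.Set.contains blocking element) then combined_shell_args ++ [element]
    else combined_shell_args)
    configured_shell_args

-- ===== PRECONDITION & SPEC =====
def Spec_add_all_argument_py (shell_command_args : List String) (configured_shell_args : List String) (out : List String) : Prop := out = add_all_argument_py_alt shell_command_args configured_shell_args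
instance (shell_command_args : List String) (configured_shell_args : List String) (out : List String) : Decidable (Spec_add_all_argument_py shell_command_args configured_shell_args out) := by unfold Spec_add_all_argument_py; infer_instance

-- ===== CLAIM (what is proved, stated in full; the proofs are below) =====
def Claim_equal_add_all_argument_py : Prop := ∀ (shell_command_args : List String) (configured_shell_args : List String), Dom_add_all_argument_py shell_command_args configured_shell_args → Spec_add_all_argument_py shell_command_args configured_shell_args (add_all_argument_py shell_command_args configured_shell_args)

-- ===== LEMMAS AND PROOFS =====

-- structural form of A's per-element "should add" test
def pvShouldAddRec : List String → String → Bool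
  | [], _ => true
  | a :: rest, e =>
    ((!(PySem.Str.lower a == e)) || !(rest.all (fun t => PySem.Str.startswith t "-"))) &&
    pvShouldAddRec rest e

lemma pvEnum_all_eq (L : List String) (e : String) :
    ∀ (cfg : List String) (k : Nat), cfg = L.drop k →
    (PySem.List.enumerate cfg (k : Int)).all (fun p =>
        (!(PySem.Str.lower p.2 == e)) ||
        (decide ((L.length : Int) > p.1 + 1) &&
          !((PySem.List.slice L (some (p.1 + 1)) none).all
              (fun test_arg => PySem.Str.startswith test_arg "-")))) = pvShouldAddRec cfg e := by
  intro cfg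
  induction cfg with
  | nil => intro k _; simp [PySem.List.enumerate, pvShouldAddRec]
  | cons a rest ih =>
    intro k hk
    have hdrop : L.drop (k + 1) = rest := by
      have := hk ▸ (List.drop_drop (l := L) (i := 1) (j := k))
      simpa using this.symm
    have hlen : rest.length + 1 = L.length - k := by
      have h1 : (a :: rest).length = L.length - k := by rw [hk, List.length_drop]
      simpa using h1
    have hcast : ((k : Int) + 1) = ((k + 1 : Nat) : Int) := by push_cast; ring
    have hslice : PySem.List.slice L (some (((k + 1 : Nat) : Int))) none = rest := by
      rw [PySem.List.slice_from_natCast, hdrop]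
    have hdec : decide ((L.length : Int) > ((k + 1 : Nat) : Int))
        = decide (0 < rest.length) := by
      apply decide_eq_decide.mpr
      omega
    rw [PySem.List.enumerate_cons]
    simp only [List.all_cons, pvShouldAddRec, hcast]
    rw [ih (k + 1) hdrop.symm]
    congr 1
    rw [hslice, hdec]
    cases rest with
    | nil => simp
    | cons b t => simp

lemma pvCollect_snd (cfg : List String) :
    (pvCollectBlocking cfg).2 = cfg.all (fun t => PySem.Str.startswith t "-") := by
  induction cfg with
  | nil => simp [pvCollectBlocking]
  | cons a rest ih => simp [pvCollectBlocking, ih, Bool.and_comm]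

lemma pvContains_add (s : PySem.Set String) (x e : String) :
    PySem.Set.contains (PySem.Set.add s x) e = (PySem.Set.contains s e || x == e) := by
  simp only [PySem.Set.add]
  by_cases h : PySem.Set.contains s x
  · rw [if_pos h]
    by_cases hxe : x = e
    · subst hxe
      simp only [beq_self_eq_true, Bool.or_true]
      exact h
    · rw [beq_eq_false_iff_ne.mpr hxe, Bool.or_false]
  · rw [if_neg h]
    simp only [PySem.Set.contains_eq_listContains, List.contains_eq_mem, List.mem_append,
      List.mem_singleton]
    by_cases hxe : e = x
    · simp [hxe]
    · have hb : (x == e) = false := beq_eq_false_iff_ne.mpr (fun hh => hxe hh.symm)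
      simp [hxe, hb]

lemma pvShouldAddRec_eq_not_contains (cfg : List String) (e : String) :
    pvShouldAddRec cfg e = !(PySem.Set.contains (pvCollectBlocking cfg).1 e) := by
  induction cfg with
  | nil => simp [pvShouldAddRec, pvCollectBlocking, PySem.Set.empty, PySem.Set.contains]
  | cons a rest ih =>
    have hsnd := pvCollect_snd rest
    simp only [pvShouldAddRec, pvCollectBlocking]
    cases hb : (pvCollectBlocking rest).2 with
    | false =>
      have hall : rest.all (fun t => PySem.Str.startswith t "-") = false := by
        rw [← hsnd, hb]
      simp only [Bool.false_eq_true, if_false, hall, Bool.not_false, Bool.or_true,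
        Bool.true_and, ih]
    | true =>
      have hall : rest.all (fun t => PySem.Str.startswith t "-") = true := by
        rw [← hsnd, hb]
      simp only [if_true, pvContains_add, hall, Bool.not_true, Bool.or_false, ih,
        Bool.not_or]
      cases hc : PySem.Set.contains (pvCollectBlocking rest).1 e <;>
        cases hl : (PySem.Str.lower a == e) <;> rfl

lemma pvKey (cfg : List String) (e : String) :
    (PySem.List.enumerate cfg).all (fun p =>
        (!(PySem.Str.lower p.2 == e)) ||
        (decide ((cfg.length : Int) > p.1 + 1) &&
          !((PySem.List.slice cfg (some (p.1 + 1)) none).all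
              (fun test_arg => PySem.Str.startswith test_arg "-"))))
      = !(PySem.Set.contains (pvCollectBlocking cfg).1 e) := by
  have h := pvEnum_all_eq cfg e cfg 0 (by simp)
  simp only [Nat.cast_zero] at h
  rw [← pvShouldAddRec_eq_not_contains, ← h]

-- ===== VERDICT (by name: the statement is the Claim_ definition above) =====
theorem add_all_argument_py_spec : Claim_equal_add_all_argument_py := by
  intro sa ca _
  unfold Spec_add_all_argument_py add_all_argument_py add_all_argument_py_alt
  simp only [pvKey]
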